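-- pv_equiv track=rewrite | github.com/HamletGhost/HomeScripts | bin/common/cut_lines.py | FileTail
-- ===== SOURCE A (Python) =====
-- import collections
--
-- def FileTail(
--  data: "iterable data to select from",
--  n: "number of lines to keep from the end",
--  ) -> "data length and a buffer with at most n lines from the end of the file (not stripped)":
--
--   sub = collections.deque([], n)
--   l = 0
--   for line in data:
--     sub.append(line)
--     l += 1
--   return l, list(sub)
-- ===== SOURCE B (Python) =====
-- def FileTail(data, n):
--     lst = list(data)
--     l = len(lst)
--     return l, lst[max(l - n, 0):]
-- ===== Notes on version B (the rewrite author's own statement) =====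
-- stated objective: simpler
-- what changed: B replaces the online bounded-deque maintenance (append + implicit popleft per line) with store-then-slice: materialize the list once, take its length, and return the tail slice lst[max(l-n,0):].
import Mathlib
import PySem

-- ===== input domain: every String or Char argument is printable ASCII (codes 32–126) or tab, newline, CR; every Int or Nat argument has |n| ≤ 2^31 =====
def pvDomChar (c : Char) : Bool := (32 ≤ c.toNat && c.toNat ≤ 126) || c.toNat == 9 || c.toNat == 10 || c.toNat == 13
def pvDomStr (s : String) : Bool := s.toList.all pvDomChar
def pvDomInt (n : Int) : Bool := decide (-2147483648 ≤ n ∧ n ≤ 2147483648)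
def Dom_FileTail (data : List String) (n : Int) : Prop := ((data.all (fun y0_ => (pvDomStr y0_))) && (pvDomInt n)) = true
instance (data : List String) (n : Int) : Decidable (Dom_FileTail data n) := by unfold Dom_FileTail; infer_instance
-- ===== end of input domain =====

-- B replaces the online bounded-deque maintenance with store-then-slice: length once, then the tail slice.

-- ===== PORT A =====
-- deque append with maxlen n: after appending, if the length exceeds n the leftmost element
-- is discarded (exact for n ≥ 0; for n < 0 Python's deque constructor raises, excluded by Pre_).
def FileTail (data : List String) (n : Int) : Int × List String :=
  let st := data.foldl
    (fun (st : List String × Int) line =>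
      let sub := st.1 ++ [line]
      ((if (sub.length : Int) > n then sub.tail else sub), st.2 + 1))
    ([], 0)
  (st.2, st.1)

-- ===== PORT B =====
def FileTail_alt (data : List String) (n : Int) : Int × List String :=
  let lst := data
  let l : Int := lst.length
  (l, PySem.List.slice lst (some (max (l - n) 0)) none)

-- ===== PRECONDITION & SPEC =====
-- A raises ValueError for negative n (deque maxlen must be non-negative); Pre_ excludes exactly that.
def Pre_FileTail (data : List String) (n : Int) : Prop := 0 ≤ n
instance (data : List String) (n : Int) : Decidable (Pre_FileTail data n) := by unfold Pre_FileTail; infer_instance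
def pvWitness_FileTail : List String × Int := (["a", "b"], 1)

def Spec_FileTail (data : List String) (n : Int) (out : Int × List String) : Prop := out = FileTail_alt data n
instance (data : List String) (n : Int) (out : Int × List String) : Decidable (Spec_FileTail data n out) := by unfold Spec_FileTail; infer_instance

-- ===== CLAIM (what is proved, stated in full; the proofs are below) =====
def Claim_equal_FileTail : Prop := ∀ (data : List String) (n : Int), Dom_FileTail data n → Pre_FileTail data n → Spec_FileTail data n (FileTail data n)

-- ===== LEMMAS AND PROOFS =====

-- Loop invariant for A's fold: from a buffer of length ≤ n, folding the remaining lines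
-- yields the truncated-drop tail of (buffer ++ lines) and the incremented counter.
theorem FileTail_loop_inv (n : Int) (hn : 0 ≤ n) :
    ∀ (data sub : List String) (l : Int), (sub.length : Int) ≤ n →
      data.foldl
        (fun (st : List String × Int) line =>
          let s := st.1 ++ [line]
          ((if (s.length : Int) > n then s.tail else s), st.2 + 1))
        (sub, l)
      = ((sub ++ data).drop (sub.length + data.length - n.toNat), l + data.length) := by
  intro data
  induction data with
  | nil =>
    intro sub l hlen
    simp only [List.foldl_nil, List.append_nil, List.length_nil, Nat.add_zero]
    have h0 : sub.length - n.toNat = 0 := by omega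
    simp [h0]
  | cons line rest ih =>
    intro sub l hlen
    simp only [List.foldl_cons]
    by_cases hgt : ((sub ++ [line]).length : Int) > n
    · -- buffer full: sub.length = n
      have hne : sub.length = n.toNat := by
        simp only [List.length_append, List.length_cons, List.length_nil] at hgt
        omega
      have htail : ((sub ++ [line]).tail.length : Int) ≤ n := by
        simp [List.length_tail]; omega
      rw [if_pos hgt, ih _ _ htail]
      have h1 : (sub ++ [line]).tail ++ rest = ((sub ++ [line]) ++ rest).drop 1 := by
        rw [List.drop_append_of_le_length (by simp), List.drop_one]
      rw [h1, List.drop_drop]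
      simp only [Prod.mk.injEq]
      refine ⟨?_, by simp only [List.length_cons]; push_cast; ring⟩
      congr 1
      · simp only [List.length_tail, List.length_append, List.length_cons, List.length_nil]
        omega
      · simp [List.append_assoc]
    · have hle : ((sub ++ [line]).length : Int) ≤ n := by omega
      rw [if_neg hgt, ih _ _ hle]
      simp only [Prod.mk.injEq]
      refine ⟨?_, by simp only [List.length_cons]; push_cast; ring⟩
      congr 1
      · simp only [List.length_append, List.length_cons, List.length_nil]
        omega
      · simp [List.append_assoc]

-- ===== VERDICT (by name: the statement is the Claim_ definition above) =====
theorem FileTail_spec : Claim_equal_FileTail := by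
  intro data n _ hn
  unfold Pre_FileTail at hn
  unfold Spec_FileTail FileTail FileTail_alt
  dsimp only
  have := FileTail_loop_inv n hn data [] 0 (by simpa using hn)
  simp only [List.nil_append, List.length_nil, Nat.zero_add, Int.zero_add] at this
  rw [this, PySem.List.slice_from data (le_max_right _ _)]
  have hmax : (max ((data.length : Int) - n) 0).toNat = data.length - n.toNat := by omega
  simp [hmax]
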